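-- pv_equiv track=rewrite | github.com/akathorn/codejam | archive/2022/Round 1C/squary.py | solve_formula
-- ===== SOURCE A (Python) =====
-- from typing import Any, Callable, List, Sequence, TypeVar, Union, Tuple, Optional
--
-- def solve_formula(E: List[int], K: int) -> Optional[List[int]]:
--     if K > 1:
--         raise Exception()
--
--     if E == [0]:
--         return [1]
--     if sum(E) == 0:
--         return None
--
--     # a = 0
--     # for i in range(len(E)):
--     #     for j in range(i):
--     #         a += E[i] * E[j]
--     # b = sum(E)
--     # if a % b != 0:
--     #     return None
--     # else:
--     #     return [-a // b]
--
--     squares = sum(e ** 2 for e in E)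
--     a = squares - sum(E) ** 2
--     b = 2 * sum(E)
--     if a % b == 0:
--         return [a // b]
--     return None
-- ===== SOURCE B (Python) =====
-- from typing import List, Optional
--
-- def solve_formula(E: List[int], K: int) -> Optional[List[int]]:
--     if K > 1:
--         raise Exception()
--
--     if E == [0]:
--         return [1]
--     S = sum(E)
--     if S == 0:
--         return None
--
--     # one-pass running-prefix cross-sum: P = sum of E[i]*E[j] over i<j
--     P = 0
--     prefix = 0
--     for e in E:
--         P += prefix * e
--         prefix += e
--     if P % S == 0:
--         return [-P // S]
--     return None
-- ===== Notes on version B (the rewrite author's own statement) =====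
-- stated objective: alternative
-- what changed: Replaces the squares-minus-square-of-sum closed form (a = Σe² − S², b = 2S) by a one-pass running-prefix computation of the pairwise cross-sum P = Σ_{i<j} E[i]E[j], using the identity S² = Σe² + 2P, and tests P % S == 0 returning [-P // S].
import Mathlib
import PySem

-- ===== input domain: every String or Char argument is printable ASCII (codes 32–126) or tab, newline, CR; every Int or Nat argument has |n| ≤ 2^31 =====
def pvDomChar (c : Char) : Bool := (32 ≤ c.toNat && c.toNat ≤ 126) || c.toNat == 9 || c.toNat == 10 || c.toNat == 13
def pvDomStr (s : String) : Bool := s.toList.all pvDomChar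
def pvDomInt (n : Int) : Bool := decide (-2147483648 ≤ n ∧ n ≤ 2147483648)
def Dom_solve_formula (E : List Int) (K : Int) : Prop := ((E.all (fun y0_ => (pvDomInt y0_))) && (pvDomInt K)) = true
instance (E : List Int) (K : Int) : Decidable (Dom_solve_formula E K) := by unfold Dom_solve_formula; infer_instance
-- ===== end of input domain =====

-- B replaces A's closed form Σe² − S² over 2S by a one-pass running-prefix cross-sum P with P % S; alternative decomposition, same cost.
-- Both Pythons raise on K > 1; Pre_ excludes exactly those inputs.

-- ===== PORT A =====
def solve_formula (E : List Int) (K : Int) : Option (List Int) :=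
  if K > 1 then none   -- Python: raise Exception(); excluded by Pre_
  else if E = [0] then some [1]
  else if E.foldl (· + ·) 0 = 0 then none
  else
    let squares : Int := E.foldl (fun acc e => acc + e ^ 2) 0
    let a : Int := squares - (E.foldl (· + ·) 0) ^ 2
    let b : Int := 2 * (E.foldl (· + ·) 0)
    if PySem.Int.mod a b = 0 then some [PySem.Int.floordiv a b] else none

-- ===== PORT B =====
def solve_formula_alt (E : List Int) (K : Int) : Option (List Int) :=
  if K > 1 then none   -- Python: raise Exception(); excluded by Pre_
  else if E = [0] then some [1]
  else
    let S : Int := E.foldl (· + ·) 0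
    if S = 0 then none
    else
      let st : Int × Int := E.foldl (fun st e => (st.1 + st.2 * e, st.2 + e)) (0, 0)
      if PySem.Int.mod st.1 S = 0 then some [PySem.Int.floordiv (-st.1) S] else none

-- ===== PRECONDITION & SPEC =====
-- Pre_ excludes K > 1, where Python A raises Exception.
def Pre_solve_formula (E : List Int) (K : Int) : Prop := K ≤ 1
instance (E : List Int) (K : Int) : Decidable (Pre_solve_formula E K) := by unfold Pre_solve_formula; infer_instance
def pvWitness_solve_formula : List Int × Int := ([1, 2, 3], 1)

def Spec_solve_formula (E : List Int) (K : Int) (out : Option (List Int)) : Prop := out = solve_formula_alt E K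
instance (E : List Int) (K : Int) (out : Option (List Int)) : Decidable (Spec_solve_formula E K out) := by unfold Spec_solve_formula; infer_instance

-- ===== CLAIM =====
def Claim_equal_solve_formula : Prop := ∀ (E : List Int) (K : Int), Dom_solve_formula E K → Pre_solve_formula E K → Spec_solve_formula E K (solve_formula E K)

-- ===== LEMMAS AND PROOFS =====

-- recursive characterisations of the three folds
def sumT : List Int → Int
  | [] => 0
  | e :: t => e + sumT t

def sqT : List Int → Int
  | [] => 0
  | e :: t => e ^ 2 + sqT t

def pairT : List Int → Int
  | [] => 0
  | e :: t => e * sumT t + pairT t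

theorem foldl_sum (E : List Int) (s : Int) : E.foldl (· + ·) s = s + sumT E := by
  induction E generalizing s with
  | nil => simp [sumT]
  | cons e t ih => simp [List.foldl, sumT, ih]; ring

theorem foldl_sq (E : List Int) (s : Int) :
    E.foldl (fun acc e => acc + e ^ 2) s = s + sqT E := by
  induction E generalizing s with
  | nil => simp [sqT]
  | cons e t ih => simp [List.foldl, sqT, ih]; ring

theorem foldl_pair (E : List Int) (P s : Int) :
    E.foldl (fun st e => (st.1 + st.2 * e, st.2 + e)) (P, s)
      = (P + s * sumT E + pairT E, s + sumT E) := by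
  induction E generalizing P s with
  | nil => simp [sumT, pairT]
  | cons e t ih =>
    simp only [List.foldl, ih, sumT, pairT, Prod.mk.injEq]
    constructor <;> ring

theorem sq_sum_identity (E : List Int) : (sumT E) ^ 2 = sqT E + 2 * pairT E := by
  induction E with
  | nil => simp [sumT, sqT, pairT]
  | cons e t ih => simp only [sumT, sqT, pairT]; ring_nf; ring_nf at ih; linarith

-- exact floor division: if q * b = a with b ≠ 0 then a // b = q
theorem floordiv_exact (a b q : Int) (hb : b ≠ 0) (h : q * b = a) :
    PySem.Int.floordiv a b = q := by
  have hmod : PySem.Int.mod a b = 0 := by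
    rw [PySem.Int.mod_eq_zero_iff_dvd]; exact ⟨q, by rw [← h]; ring⟩
  have := PySem.Int.floordiv_mul_add_mod a b
  rw [hmod, add_zero] at this
  have : PySem.Int.floordiv a b * b = q * b := by rw [this, h]
  exact mul_right_cancel₀ hb this

-- ===== VERDICT =====
theorem solve_formula_spec : Claim_equal_solve_formula := by
  intro E K _hdom hK
  unfold Spec_solve_formula solve_formula solve_formula_alt
  have hKle : ¬ K > 1 := by exact not_lt.mpr hK
  simp only [hKle, if_false]
  by_cases hE0 : E = [0]
  · simp [hE0]
  · simp only [hE0, if_false]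
    set S := E.foldl (· + ·) 0 with hS
    by_cases hS0 : S = 0
    · simp [hS0]
    · simp only [hS0, if_false]
      have hSsum : S = sumT E := by rw [hS, foldl_sum]; ring
      have hsq : E.foldl (fun acc e => acc + e ^ 2) 0 = sqT E := by
        rw [foldl_sq]; ring
      have hpair : (E.foldl (fun st e => (st.1 + st.2 * e, st.2 + e)) ((0 : Int), (0 : Int))).1 = pairT E := by
        rw [foldl_pair]; simp
      have hid : sqT E - S ^ 2 = -2 * pairT E := by
        rw [hSsum, sq_sum_identity]; ring
      -- divisibility equivalence: 2S ∣ (Σe² − S²) ↔ S ∣ P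
      have hdveq : (PySem.Int.mod (E.foldl (fun acc e => acc + e ^ 2) 0 - S ^ 2) (2 * S) = 0)
          ↔ (PySem.Int.mod (E.foldl (fun st e => (st.1 + st.2 * e, st.2 + e)) ((0 : Int), (0 : Int))).1 S = 0) := by
        rw [PySem.Int.mod_eq_zero_iff_dvd, PySem.Int.mod_eq_zero_iff_dvd, hsq, hpair, hid]
        constructor
        · rintro ⟨c, hc⟩
          exact ⟨-c, by linarith⟩
        · rintro ⟨c, hc⟩
          exact ⟨-c, by rw [hc]; ring⟩
      by_cases hdv : PySem.Int.mod (E.foldl (fun st e => (st.1 + st.2 * e, st.2 + e)) ((0 : Int), (0 : Int))).1 S = 0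
      · have hdvA := hdveq.mpr hdv
        simp only [hdvA, hdv, if_true]
        -- quotients agree: both are the exact quotient −c where P = S·c
        rw [PySem.Int.mod_eq_zero_iff_dvd] at hdv
        obtain ⟨c, hc⟩ := hdv
        rw [hpair] at hc
        have h2S : (2 : Int) * S ≠ 0 := mul_ne_zero (by norm_num) hS0
        have h1 : PySem.Int.floordiv (E.foldl (fun acc e => acc + e ^ 2) 0 - S ^ 2) (2 * S) = -c := by
          apply floordiv_exact _ _ _ h2S
          rw [hsq, hid, hc]; ring
        have h2 : PySem.Int.floordiv (-(E.foldl (fun st e => (st.1 + st.2 * e, st.2 + e)) ((0 : Int), (0 : Int))).1) S = -c := by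
          apply floordiv_exact _ _ _ hS0
          rw [hpair, hc]; ring
        rw [h1, h2]
      · have hdvA : ¬ PySem.Int.mod (E.foldl (fun acc e => acc + e ^ 2) 0 - S ^ 2) (2 * S) = 0 := by
          intro h; exact hdv (hdveq.mp h)
        rw [if_neg hdvA, if_neg hdv]
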